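-- pv_equiv track=rewrite | github.com/jjinyeok/Programmers | Hash/3.py | solution
-- ===== SOURCE A (Python) =====
-- def solution(clothes):
--     from collections import Counter
--     answer = 1
--     dic = Counter(category for item, category in clothes)
--     for key in dic.keys():
--         answer *= (dic[key] + 1)
--     answer -= 1
--     return answer
-- ===== SOURCE B (Python) =====
-- def solution(clothes):
--     # sort a fresh list of categories, then one run-length pass over the runs
--     cats = sorted(category for _, category in clothes)
--     answer = 1
--     while cats:
--         head = cats[0]
--         i = 1
--         while i < len(cats) and cats[i] == head:
--             i += 1
--         answer *= i + 1
--         cats = cats[i:]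
--     return answer - 1
-- ===== Notes on version B (the rewrite author's own statement) =====
-- stated objective: alternative
-- what changed: B drops the hash Counter entirely: it sorts a fresh list of the categories and multiplies (run length + 1) over the equal runs in one ordered run-length pass, subtracting 1 at the end.
import Mathlib
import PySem

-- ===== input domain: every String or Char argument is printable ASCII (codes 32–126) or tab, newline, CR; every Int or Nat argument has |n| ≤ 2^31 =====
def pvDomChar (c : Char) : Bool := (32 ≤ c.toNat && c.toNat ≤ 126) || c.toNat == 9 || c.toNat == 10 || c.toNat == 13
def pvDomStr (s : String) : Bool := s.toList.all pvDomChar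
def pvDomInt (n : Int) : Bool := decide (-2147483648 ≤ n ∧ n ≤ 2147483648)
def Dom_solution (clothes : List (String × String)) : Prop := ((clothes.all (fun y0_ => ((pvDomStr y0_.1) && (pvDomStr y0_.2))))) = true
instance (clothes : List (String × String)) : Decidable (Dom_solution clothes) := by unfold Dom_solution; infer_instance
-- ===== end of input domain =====

-- B replaces A's hash Counter by sorting the categories and multiplying run lengths in one
-- ordered pass — an alternative traversal, not claimed faster.

-- ===== PORT A =====
def solution (clothes : List (String × String)) : Int :=
  let dic := PySem.Dict.counter (clothes.map (fun p => p.2))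
  -- 'dic[key]' with key drawn from dic.keys always succeeds, so getD 0 is exact here
  let answer := dic.keys.foldl (fun answer key => answer * (dic.getD key 0 + 1)) 1
  answer - 1

-- ===== PORT B =====
-- Source B's 'while cats:' loop: i ends as 1 + (length of the run of cats[0] in the tail),
-- 'answer *= i + 1', 'cats = cats[i:]' is the tail with that run dropped.
def runLoop (cats : List String) (answer : Int) : Int :=
  match cats with
  | [] => answer
  | head :: rest =>
      runLoop (rest.dropWhile (fun x => x == head))
        (answer * (((rest.takeWhile (fun x => x == head)).length : Int) + 2))
termination_by cats.length
decreasing_by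
  simp only [List.length_cons]
  exact Nat.lt_succ_of_le (List.dropWhile_sublist _).length_le

def solution_alt (clothes : List (String × String)) : Int :=
  runLoop (PySem.List.sorted (clothes.map (fun p => p.2)) (fun c => c) false) 1 - 1

-- ===== PRECONDITION & SPEC =====
def Spec_solution (clothes : List (String × String)) (out : Int) : Prop := out = solution_alt clothes
instance (clothes : List (String × String)) (out : Int) : Decidable (Spec_solution clothes out) := by unfold Spec_solution; infer_instance

-- ===== CLAIM (what is proved, stated in full; the proofs are below) =====
def Claim_equal_solution : Prop := ∀ (clothes : List (String × String)), Dom_solution clothes → Spec_solution clothes (solution clothes)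

-- ===== LEMMAS AND PROOFS =====

-- product of (count of k in s) + 1 over the keys u
def prodOver (u s : List String) : Int := (u.map (fun k => ((s.count k : Int) + 1))).prod

lemma foldl_mul_eq_prod (l : List String) (f : String → Int) (a : Int) :
    l.foldl (fun acc k => acc * f k) a = a * (l.map f).prod := by
  induction l generalizing a with
  | nil => simp
  | cons x t ih => simp [List.foldl_cons, ih, mul_assoc]

lemma prodOver_perm (u u' s : List String) (h : u.Perm u') : prodOver u s = prodOver u' s :=
  (h.map _).prod_eq

lemma prodOver_congr_mem (u s t : List String) (h : ∀ k ∈ u, s.count k = t.count k) :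
    prodOver u s = prodOver u t := by
  unfold prodOver
  congr 1
  exact List.map_congr_left (fun k hk => by rw [h k hk])

lemma prodOver_cons (c : String) (u s : List String) :
    prodOver (c :: u) s = ((s.count c : Int) + 1) * prodOver u s := by
  simp [prodOver]

lemma solution_eq_prodOver (clothes : List (String × String)) :
    solution clothes = prodOver (PySem.Set.ofList (clothes.map (fun p => p.2))) (clothes.map (fun p => p.2)) - 1 := by
  unfold solution
  simp only [PySem.Dict.keys_counter, PySem.Dict.getD_counter]
  rw [foldl_mul_eq_prod _ (fun k => ((clothes.map (fun p => p.2)).count k : Int) + 1)]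
  simp [prodOver]

lemma not_mem_dropWhile_self (c : String) (l : List String) :
    (∀ x ∈ l, c ≤ x) → l.Pairwise (· ≤ ·) → c ∉ l.dropWhile (fun x => x == c) := by
  induction l with
  | nil => simp
  | cons x t ih =>
    intro hle hpw
    obtain ⟨hxt, hpt⟩ := List.pairwise_cons.mp hpw
    by_cases hx : x = c
    · subst hx
      rw [List.dropWhile_cons_of_pos (by simp)]
      exact ih (fun y hy => hle y (List.mem_cons_of_mem _ hy)) hpt
    · rw [List.dropWhile_cons_of_neg (by simp [hx])]
      intro hmem
      rcases List.mem_cons.mp hmem with h | h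
      · exact hx h.symm
      · exact hx (le_antisymm (hxt c h) (hle x List.mem_cons_self))

lemma runLoop_eq : ∀ (s : List String), s.Pairwise (· ≤ ·) → ∀ a : Int,
    runLoop s a = a * prodOver (PySem.Set.ofList s) s
  | [], _, a => by
      simp [runLoop, prodOver, PySem.Set.ofList]
  | c :: rest, hs, a => by
      rw [runLoop]
      obtain ⟨hc, hrest⟩ := List.pairwise_cons.mp hs
      have hrunAll : ∀ x ∈ rest.takeWhile (fun x => x == c), x = c :=
        fun x hx => eq_of_beq (List.mem_takeWhile_imp (p := fun x => x == c) hx)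
      -- c does not occur after its run of equal elements (the list is sorted)
      have hcdrop : c ∉ rest.dropWhile (fun x => x == c) :=
        not_mem_dropWhile_self c rest hc hrest
      have hdropPW : (rest.dropWhile (fun x => x == c)).Pairwise (· ≤ ·) :=
        List.Pairwise.sublist (List.dropWhile_sublist _) hrest
      have hrec := runLoop_eq (rest.dropWhile (fun x => x == c)) hdropPW
        (a * (((rest.takeWhile (fun x => x == c)).length : Int) + 2))
      rw [hrec]
      set run := rest.takeWhile (fun x => x == c) with hrunDef
      set drop := rest.dropWhile (fun x => x == c) with hdropDef
      have hsplit : run ++ drop = rest := List.takeWhile_append_dropWhile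
      have hcount_run : run.count c = run.length :=
        List.count_eq_length.mpr (fun b hb => (hrunAll b hb).symm)
      have hcount_drop0 : drop.count c = 0 := List.count_eq_zero.mpr hcdrop
      have hrestc : rest.count c = run.length := by
        rw [← hsplit, List.count_append, hcount_run, hcount_drop0, Nat.add_zero]
      have hk : ∀ k ∈ PySem.Set.ofList drop, (c :: rest).count k = drop.count k := by
        intro k hkmem
        have hkd : k ∈ drop := (PySem.Set.mem_ofList _ _).mp hkmem
        have hkc : k ≠ c := fun h => hcdrop (h ▸ hkd)
        have hkrun : run.count k = 0 :=
          List.count_eq_zero.mpr (fun hkr => hkc (hrunAll k hkr))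
        rw [← hsplit]
        simp [List.count_append, hkrun, Ne.symm hkc]
      have hperm : (PySem.Set.ofList (c :: rest)).Perm (c :: PySem.Set.ofList drop) := by
        refine (List.perm_ext_iff_of_nodup (PySem.Set.nodup_ofList _) ?_).mpr ?_
        · exact List.nodup_cons.mpr
            ⟨fun h => hcdrop ((PySem.Set.mem_ofList _ _).mp h), PySem.Set.nodup_ofList _⟩
        · intro x
          simp only [PySem.Set.mem_ofList, List.mem_cons]
          constructor
          · rintro (rfl | hx)
            · exact Or.inl rfl
            · rw [← hsplit] at hx
              rcases List.mem_append.mp hx with h | h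
              · exact Or.inl (hrunAll x h)
              · exact Or.inr h
          · rintro (rfl | hx)
            · exact Or.inl rfl
            · refine Or.inr ?_
              rw [← hsplit]
              exact List.mem_append.mpr (Or.inr hx)
      rw [prodOver_perm _ _ _ hperm, prodOver_cons,
        prodOver_congr_mem _ _ _ hk, List.count_cons_self, hrestc]
      push_cast
      ring
termination_by s => s.length
decreasing_by
  simp only [List.length_cons]
  exact Nat.lt_succ_of_le (List.dropWhile_sublist _).length_le

lemma prodOver_sorted_eq (cats : List String) :
    prodOver (PySem.Set.ofList cats) cats =
      prodOver (PySem.Set.ofList (PySem.List.sorted cats (fun c => c) false))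
        (PySem.List.sorted cats (fun c => c) false) := by
  have hperm : (PySem.List.sorted cats (fun c => c) false).Perm cats :=
    PySem.List.sorted_perm _ _ _
  rw [prodOver_congr_mem (PySem.Set.ofList (PySem.List.sorted cats (fun c => c) false))
    (PySem.List.sorted cats (fun c => c) false) cats (fun k _ => hperm.count_eq k)]
  exact prodOver_perm _ _ _ <| (List.perm_ext_iff_of_nodup
    (PySem.Set.nodup_ofList _) (PySem.Set.nodup_ofList _)).mpr
    (fun x => by simp only [PySem.Set.mem_ofList]; exact hperm.mem_iff.symm)

-- ===== VERDICT (by name: the statement is the Claim_ definition above) =====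
theorem solution_spec : Claim_equal_solution := by
  intro clothes _
  unfold Spec_solution solution_alt
  rw [solution_eq_prodOver, runLoop_eq _ (PySem.List.sorted_pairwise _ _) 1, one_mul,
    prodOver_sorted_eq]
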